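-- pv_equiv track=rewrite | github.com/shg9411/algo | algo_py/programmers/pro60058.py | partSolution
-- ===== SOURCE A (Python) =====
-- def partition(s):
--     stack = [s[0]]
--     for i in range(1, len(s)):
--         if s[i] == stack[-1]:
--             stack.append(s[i])
--         else:
--             stack.pop()
--         if not stack:
--             return[s[:i+1], s[i+1:]]
--
-- def correct(u):
--     stack = []
--     for char in u:
--         try:
--             if char == ')':
--                 stack.pop()
--             else:
--                 stack.append(char)
--         except:
--             return False
--     return True if not stack else False
--
-- def partSolution(w):
--     tmp = ''
--     if w == '':
--         return ''
--     [u, v] = partition(w)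
--     if correct(u):
--         tmp = u + partSolution(v)
--     else:
--         tmp = '('+partSolution(v)+')'
--         for char in u[1:-1]:
--             if char =='(':
--                 tmp+=')'
--             else:
--                 tmp+='('
--     return tmp
-- ===== SOURCE B (Python) =====
-- def partSolution(w):
--     # one linear scan cuts w into minimal blocks (first char of a block counts +1,
--     # any other char -1; cut when the counter returns to 0), then a right-to-left
--     # fold assembles the result; a block u is valid iff u[0] != ')' and half its
--     # characters are ')'.
--     units = []
--     cur = ''
--     bal = 0
--     for ch in w:
--         if bal == 0:
--             cur = ch
--             bal = 1
--         else:
--             cur += ch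
--             bal += 1 if ch == cur[0] else -1
--         if bal == 0:
--             units.append(cur)
--             cur = ''
--     res = ''
--     for u in reversed(units):
--         if u[0] != ')' and 2 * u.count(')') == len(u):
--             res = u + res
--         else:
--             res = '(' + res + ')' + ''.join(')' if c == '(' else '(' for c in u[1:-1])
--     return res
-- ===== Notes on version B (the rewrite author's own statement) =====
-- stated objective: alternative
-- what changed: Replaces A's recursion-on-remainder (with a stack-based partition helper and a stack-based validity check per unit) by one linear counter scan that cuts w into its minimal blocks up front, followed by a right-to-left fold over the block list whose validity test is a pure counting condition (u[0] != ')' and half of u's characters are ')') instead of a stack simulation.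
-- outside the precondition, e.g. on partSolution(')'): A raises TypeError, B returns ''
import Mathlib
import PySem

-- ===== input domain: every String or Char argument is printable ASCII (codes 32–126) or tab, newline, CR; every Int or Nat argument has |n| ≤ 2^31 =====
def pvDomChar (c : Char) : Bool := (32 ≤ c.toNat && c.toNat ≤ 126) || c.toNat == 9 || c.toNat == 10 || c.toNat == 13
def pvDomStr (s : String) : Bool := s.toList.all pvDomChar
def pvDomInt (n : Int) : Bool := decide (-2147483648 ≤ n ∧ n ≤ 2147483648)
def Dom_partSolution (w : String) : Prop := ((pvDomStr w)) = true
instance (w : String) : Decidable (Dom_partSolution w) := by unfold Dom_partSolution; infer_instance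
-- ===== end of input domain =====

-- B replaces A's recursion-on-remainder (stack-based partition + stack-based correct())
-- by one counter scan cutting w into minimal blocks plus a right-to-left fold with a
-- counting validity test; return values agree on all of Pre_ (alternative decomposition,
-- no speed claim).

-- ===== PORT A =====
-- partition(s): stack loop over s[1:]; returns none where Python's partition returns
-- None (the caller's unpacking then raises TypeError, excluded by Pre_).
def pvPartitionLoop : List Char → List Char → List Char → Option (List Char × List Char)
  | [], _, _ => none
  | x :: xs, stack, pre =>
    let stack' := if stack.head? = some x then x :: stack else stack.tail
    if stack' = [] then some (pre ++ [x], xs) else pvPartitionLoop xs stack' (pre ++ [x])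

def pvPartition : List Char → Option (List Char × List Char)
  | [] => none            -- unreachable: partSolution only calls partition on nonempty w
  | c :: rs => pvPartitionLoop rs [c] [c]

-- correct(u): try/except stack loop; pop of the empty stack (Python's except) is the [] branch
def pvCorrectLoop : List Char → List Char → Bool
  | stack, [] => stack.isEmpty
  | stack, ch :: cs =>
    if ch = ')' then (match stack with | [] => false | _ :: t => pvCorrectLoop t cs)
    else pvCorrectLoop (ch :: stack) cs

def pvCorrect (u : List Char) : Bool := pvCorrectLoop [] u

theorem pvPartitionLoop_lt : ∀ (rest stack pre u v : List Char),
    pvPartitionLoop rest stack pre = some (u, v) → v.length < rest.length := by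
  intro rest
  induction rest with
  | nil => intro _ _ _ _ h; simp [pvPartitionLoop] at h
  | cons x xs ih =>
    intro stack pre u v h
    simp only [pvPartitionLoop] at h
    by_cases hx : stack.head? = some x <;>
      simp only [hx, if_true, if_false, reduceIte] at h <;> split at h <;>
      first
      | (simp only [Option.some.injEq, Prod.mk.injEq] at h; rcases h with ⟨-, rfl⟩; simp)
      | (exact Nat.lt_succ_of_lt (ih _ _ _ _ h))

theorem pvPartition_lt {l u v : List Char} (h : pvPartition l = some (u, v)) :
    v.length < l.length := by
  cases l with
  | nil => simp [pvPartition] at h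
  | cons c rs => simpa using Nat.lt_succ_of_lt (pvPartitionLoop_lt _ _ _ _ _ h)

def pvGoA : List Char → List Char
  | [] => []
  | c :: rs =>
    match h : pvPartition (c :: rs) with
    | none => []          -- Python raises TypeError here; excluded by Pre_
    | some (u, v) =>
      if pvCorrect u then u ++ pvGoA v
      else List.foldl (fun t ch => t ++ [if ch = '(' then ')' else '('])
             (['('] ++ pvGoA v ++ [')']) (PySem.List.slice u (some 1) (some (-1)))
  termination_by l => l.length
  decreasing_by all_goals exact pvPartition_lt h

def partSolution (w : String) : String := String.ofList (pvGoA w.toList)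

-- ===== PORT B =====
-- first pass: fold over the characters with state (units, cur, bal)
def pvStepB (st : List (List Char) × List Char × Nat) (ch : Char) :
    List (List Char) × List Char × Nat :=
  let (units, cur, bal) := st
  let cur' := if bal = 0 then [ch] else cur ++ [ch]
  let bal' := if bal = 0 then 1 else if cur.head? = some ch then bal + 1 else bal - 1
  if bal' = 0 then (units ++ [cur'], [], 0) else (units, cur', bal')

-- second pass: fold over reversed(units) with accumulator res
def pvStepR (res : List Char) (u : List Char) : List Char :=
  match u with
  | [] => res             -- unreachable: every collected unit is nonempty
  | c :: _ =>
    if c ≠ ')' ∧ 2 * u.count ')' = u.length then u ++ res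
    else ['('] ++ res ++ [')'] ++
      (PySem.List.slice u (some 1) (some (-1))).map (fun ch => if ch = '(' then ')' else '(')

def partSolution_alt (w : String) : String :=
  String.ofList (List.foldl pvStepR [] ((List.foldl pvStepB ([], [], 0) w.toList).1).reverse)

-- ===== PRECONDITION & SPEC =====
-- per-block balance scan: a fresh block starts (counter 1) when the counter is 0;
-- inside a block its first character counts +1, any other character -1
def pvPreScan (st : Char × Nat) (ch : Char) : Char × Nat :=
  if st.2 = 0 then (ch, 1) else (st.1, if ch = st.1 then st.2 + 1 else st.2 - 1)

-- Pre_ excludes exactly the inputs on which the Python A raises (TypeError from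
-- unpacking partition's None when some suffix of w has no minimal block prefix):
-- w must decompose completely into blocks, i.e. the balance scan must end at 0
def Pre_partSolution (w : String) : Prop := (w.toList.foldl pvPreScan (' ', 0)).2 = 0
instance (w : String) : Decidable (Pre_partSolution w) := by unfold Pre_partSolution; infer_instance

def pvWitness_partSolution : String := "(())()"

def Spec_partSolution (w : String) (out : String) : Prop := out = partSolution_alt w
instance (w : String) (out : String) : Decidable (Spec_partSolution w out) := by unfold Spec_partSolution; infer_instance

-- ===== CLAIM (what is proved, stated in full; the proofs are below) =====
def Claim_equal_partSolution : Prop := ∀ (w : String), Dom_partSolution w → Pre_partSolution w → Spec_partSolution w (partSolution w)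

-- ===== LEMMAS AND PROOFS =====

-- proof-side view of Pre_: the explicit block decomposition the balance scan performs
-- shape helper for Pre_: the rest of w after the shortest prefix of `rest` in which
-- `c` occurs as often as the other characters (counting from k); none if no such prefix
def pvBlockRest (c : Char) : Nat → List Char → Option (List Char)
  | _, [] => none
  | k, x :: xs => if x = c then pvBlockRest c (k + 1) xs else if k = 1 then some xs else pvBlockRest c (k - 1) xs

theorem pvBlockRest_length : ∀ (rest : List Char) (c : Char) (k : Nat) (v : List Char),
    pvBlockRest c k rest = some v → v.length < rest.length := by
  intro rest
  induction rest with
  | nil => intro _ _ _ h; simp [pvBlockRest] at h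
  | cons x xs ih =>
    intro c k v h
    simp only [pvBlockRest] at h
    split at h
    · exact Nat.lt_succ_of_lt (ih _ _ _ h)
    · split at h
      · simp only [Option.some.injEq] at h; subst h; simp
      · exact Nat.lt_succ_of_lt (ih _ _ _ h)

-- w splits completely into minimal blocks, each opened by its own first character:
-- exactly the strings on which A's recursion returns (anywhere else partition(...)
-- returns None and A raises TypeError)
def pvChunksOk : List Char → Bool
  | [] => true
  | c :: rs =>
    match h : pvBlockRest c 1 rs with
    | none => false
    | some v => pvChunksOk v
  termination_by l => l.length
  decreasing_by exact Nat.lt_succ_of_lt (pvBlockRest_length _ _ _ _ h)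


theorem pv_bridge : ∀ (rest : List Char) (k : Nat) (c : Char) (v : List Char), 0 < k →
    pvBlockRest c k rest = some v →
    ∃ mid, rest = mid ++ v ∧
      (∀ pre, pvPartitionLoop rest (List.replicate k c) pre = some (pre ++ mid, v)) ∧
      (∀ units cur, cur.head? = some c →
        List.foldl pvStepB (units, cur, k) rest = List.foldl pvStepB (units ++ [cur ++ mid], [], 0) v) ∧
      ((∀ x ∈ mid, x = c ∨ x = ')') → c ≠ ')' → pvCorrectLoop (List.replicate k c) mid = true) ∧
      mid.length = 2 * mid.count c + k := by
  intro rest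
  induction rest with
  | nil => intro k c v hk h; simp [pvBlockRest] at h
  | cons x xs ih =>
    intro k c v hk h
    simp only [pvBlockRest] at h
    by_cases hx : x = c
    · subst hx
      rw [if_pos rfl] at h
      obtain ⟨mid', heq, hpart, hstep, hcorr, hlen⟩ := ih (k+1) x v (by omega) h
      refine ⟨x :: mid', by simp [heq], ?_, ?_, ?_, ?_⟩
      · intro pre
        have hh : (List.replicate k x).head? = some x := by
          cases k with | zero => omega | succ m => simp [List.replicate]
        have hrep : x :: List.replicate k x = List.replicate (k+1) x := by simp [List.replicate_succ]
        simp only [pvPartitionLoop, hh, if_pos rfl, hrep, if_true,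
          if_neg (by simp : ¬ List.replicate (k+1) x = ([] : List Char))]
        rw [hpart (pre ++ [x])]
        simp
      · intro units cur hcur
        have hcne : cur ≠ [] := by intro hn; simp [hn] at hcur
        have hch : (cur ++ [x]).head? = some x := by
          cases cur with | nil => exact absurd rfl hcne | cons a t => simpa using hcur
        simp only [List.foldl_cons, pvStepB, if_neg (by omega : ¬ k = 0), hcur, if_pos rfl, if_true,
          if_neg (by omega : ¬ k + 1 = 0)]
        rw [hstep units (cur ++ [x]) hch]
        simp
      · intro hall hc
        simp only [pvCorrectLoop, if_neg hc, ← List.replicate_succ]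
        exact hcorr (fun y hy => hall y (by simp [hy])) hc
      · simp only [List.length_cons, List.count_cons, BEq.rfl, if_pos, hlen]
        omega
    · rw [if_neg hx] at h
      by_cases hk1 : k = 1
      · subst hk1
        rw [if_pos rfl] at h
        obtain rfl : xs = v := by simpa using h
        refine ⟨[x], rfl, ?_, ?_, ?_, by simp [List.count_singleton, hx]⟩
        · intro pre
          simp [pvPartitionLoop, List.replicate, Option.some_inj, hx, Ne.symm hx]
        · intro units cur hcur
          simp [pvStepB, hcur, hx, Ne.symm hx]
        · intro hall hc
          have hxp : x = ')' := by
            rcases hall x (by simp) with h' | h'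
            · exact absurd h' hx
            · exact h'
          simp [hxp, pvCorrectLoop, List.replicate]
      · rw [if_neg hk1] at h
        obtain ⟨mid', heq, hpart, hstep, hcorr, hlen⟩ := ih (k-1) c v (by omega) h
        refine ⟨x :: mid', by simp [heq], ?_, ?_, ?_, ?_⟩
        · intro pre
          have hh : (List.replicate k c).head? = some c := by
            cases k with | zero => omega | succ m => simp [List.replicate]
          have htl : (List.replicate k c).tail = List.replicate (k-1) c := by
            cases k with | zero => omega | succ m => simp [List.replicate]
          have hne : ¬ ((List.replicate k c).tail = ([] : List Char)) := by
            rw [htl]; simp; omega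
          simp only [pvPartitionLoop, hh, Option.some_inj,
            if_neg (fun hcx : c = x => hx hcx.symm), if_neg hne, htl]
          rw [hpart (pre ++ [x])]
          simp
          exact fun h0 => absurd h0 (by omega)
        · intro units cur hcur
          have hcne : cur ≠ [] := by intro hn; simp [hn] at hcur
          have hch : (cur ++ [x]).head? = some c := by
            cases cur with | nil => exact absurd rfl hcne | cons a t => simpa using hcur
          have hnx : ¬ (cur.head? = some x) := by rw [hcur]; simp [Ne.symm hx]
          simp only [List.foldl_cons, pvStepB, if_neg (by omega : ¬ k = 0), hnx, if_false,
            if_neg (by omega : ¬ k - 1 = 0)]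
          rw [hstep units (cur ++ [x]) hch]
          simp
        · intro hall hc
          have hxp : x = ')' := by
            rcases hall x (by simp) with h' | h'
            · exact absurd h' hx
            · exact h'
          subst hxp
          have hrep : List.replicate k c = c :: List.replicate (k-1) c := by
            cases k with | zero => omega | succ m => simp [List.replicate]
          simp only [pvCorrectLoop, if_pos rfl, hrep]
          exact hcorr (fun y hy => hall y (by simp [hy])) hc
        · have : List.count c (x :: mid') = List.count c mid' := by
            simp [List.count_cons, hx]
          simp only [List.length_cons, this, hlen]
          omega

theorem pv_counts_le : ∀ (l : List Char) (a b : Char), a ≠ b →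
    l.count a + l.count b ≤ l.length := by
  intro l
  induction l with
  | nil => simp
  | cons y ys ih =>
    intro a b hab
    have := ih a b hab
    by_cases hya : y = a <;> by_cases hyb : y = b <;>
      simp [List.count_cons, hya, hyb, hab, Ne.symm hab] at * <;> omega

theorem pv_mem_of_counts : ∀ (l : List Char) (a b : Char), a ≠ b →
    l.count a + l.count b = l.length → ∀ x ∈ l, x = a ∨ x = b := by
  intro l
  induction l with
  | nil => simp
  | cons y ys ih =>
    intro a b hab hcnt x hx
    have hle := pv_counts_le ys a b hab
    rcases List.mem_cons.mp hx with rfl | hx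
    · by_cases hya : x = a
      · exact Or.inl hya
      · by_cases hyb : x = b
        · exact Or.inr hyb
        · exfalso; simp [List.count_cons, hya, hyb] at hcnt; omega
    · refine ih a b hab ?_ x hx
      by_cases hya : y = a <;> by_cases hyb : y = b <;>
        simp [List.count_cons, hya, hyb, hab, Ne.symm hab] at hcnt <;> omega

theorem pv_correct_count : ∀ (l st : List Char), pvCorrectLoop st l = true →
    2 * l.count ')' = st.length + l.length := by
  intro l
  induction l with
  | nil => intro st h; simp [pvCorrectLoop, List.isEmpty_iff] at h; simp [h]
  | cons ch cs ih =>
    intro st h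
    simp only [pvCorrectLoop] at h
    by_cases hc : ch = ')'
    · subst hc
      rw [if_pos rfl] at h
      cases st with
      | nil => simp at h
      | cons s t =>
        have := ih t h
        simp [List.count_cons]
        omega
    · rw [if_neg hc] at h
      have := ih (ch :: st) h
      simp [List.count_cons, hc] at this ⊢
      omega

theorem pv_stepB_prefix : ∀ (l : List Char) (units : List (List Char)) (cur : List Char) (bal : Nat),
    List.foldl pvStepB (units, cur, bal) l =
      (units ++ (List.foldl pvStepB ([], cur, bal) l).1,
       (List.foldl pvStepB ([], cur, bal) l).2.1, (List.foldl pvStepB ([], cur, bal) l).2.2) := by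
  intro l
  induction l with
  | nil => simp
  | cons ch cs ih =>
    intro units cur bal
    simp only [List.foldl_cons, pvStepB]
    split_ifs <;> (try simp only [List.nil_append]) <;>
      first
        | exact (by assumption : False).elim
        | (rw [ih (units ++ [[ch]]) [] 0, ih [[ch]] [] 0]; simp)
        | (rw [ih (units ++ [cur ++ [ch]]) [] 0, ih [cur ++ [ch]] [] 0]; simp)
        | rw [ih units [ch] 1]
        | rw [ih units (cur ++ [ch]) (bal+1)]
        | rw [ih units (cur ++ [ch]) (bal-1)]

theorem pv_chunksOk_cons {c : Char} {rs : List Char} (h : pvChunksOk (c :: rs) = true) :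
    ∃ v, pvBlockRest c 1 rs = some v ∧ pvChunksOk v = true := by
  rw [pvChunksOk] at h
  split at h
  · exact absurd h (by simp)
  · exact ⟨_, by assumption, h⟩

theorem pv_goA_cons {c : Char} {rs u v : List Char} (h : pvPartition (c :: rs) = some (u, v)) :
    pvGoA (c :: rs) =
      if pvCorrect u then u ++ pvGoA v
      else List.foldl (fun t ch => t ++ [if ch = '(' then ')' else '('])
             (['('] ++ pvGoA v ++ [')']) (PySem.List.slice u (some 1) (some (-1))) := by
  rw [pvGoA, h]

theorem pv_main : ∀ (n : Nat) (l : List Char), l.length ≤ n → pvChunksOk l = true →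
    pvGoA l = List.foldl pvStepR [] ((List.foldl pvStepB ([], [], 0) l).1).reverse := by
  intro n
  induction n with
  | zero =>
    intro l hl _
    obtain rfl : l = [] := by cases l <;> simp_all
    simp [pvGoA]
  | succ n ih =>
    intro l hl hok
    cases l with
    | nil => simp [pvGoA]
    | cons c rs =>
      obtain ⟨v, hb, hokv⟩ := pv_chunksOk_cons hok
      obtain ⟨mid, heq, hpart, hstep, hcorr, hlen⟩ := pv_bridge rs 1 c v one_pos hb
      have hvlt := pvBlockRest_length rs c 1 v hb
      have ihv := ih v (by simp at hl; omega) hokv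
      have hpartition : pvPartition (c :: rs) = some (c :: mid, v) := by
        have := hpart [c]
        simp only [List.replicate_one] at this
        simpa [pvPartition] using this
      have hfirst : List.foldl pvStepB ([], [], 0) (c :: rs) = List.foldl pvStepB ([], [c], 1) rs := by
        simp [pvStepB]
      have hrun := hstep [] [c] (by simp)
      simp only [List.nil_append] at hrun
      have hpref := pv_stepB_prefix v [[c] ++ mid] [] 0
      have hunits : (List.foldl pvStepB ([], [], 0) (c :: rs)).1 =
          (c :: mid) :: (List.foldl pvStepB ([], [], 0) v).1 := by
        rw [hfirst, hrun, hpref]; simp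
      rw [hunits, pv_goA_cons hpartition]
      simp only [List.reverse_cons, List.foldl_append, List.foldl_cons, List.foldl_nil, ← ihv]
      -- goal: if-then-else on pvCorrect = pvStepR (pvGoA v) (c :: mid)
      have hulen : (c :: mid).length = 2 * (c :: mid).count c := by
        simp [List.count_cons, hlen]; omega
      by_cases hcond : c ≠ ')' ∧ 2 * (c :: mid).count ')' = (c :: mid).length
      · obtain ⟨hc1, hc2⟩ := hcond
        have hsum : (c :: mid).count c + (c :: mid).count ')' = (c :: mid).length := by omega
        have hall := pv_mem_of_counts (c :: mid) c ')' hc1 hsum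
        have hcmid : pvCorrectLoop (List.replicate 1 c) mid = true :=
          hcorr (fun y hy => hall y (by simp [hy])) hc1
        have hcu : pvCorrect (c :: mid) = true := by
          simpa [pvCorrect, pvCorrectLoop, if_neg hc1] using hcmid
        rw [if_pos hcu]
        simp only [pvStepR]
        rw [if_pos ⟨hc1, hc2⟩]
      · have hcu : pvCorrect (c :: mid) = false := by
          by_cases hc : c = ')'
          · subst hc; simp [pvCorrect, pvCorrectLoop]
          · cases hcu : pvCorrect (c :: mid) with
            | false => rfl
            | true =>
              exfalso
              have := pv_correct_count (c :: mid) [] hcu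
              exact hcond ⟨hc, by simpa using this⟩
        rw [if_neg (by simp [hcu])]
        rw [PySem.List.foldl_append_singleton_eq_map]
        simp [pvStepR]
        intro h1 h2
        exact absurd ⟨h1, h2⟩ hcond


theorem pv_scan_zero : ∀ (l : List Char) (a b : Char),
    (List.foldl pvPreScan (a, 0) l).2 = (List.foldl pvPreScan (b, 0) l).2 := by
  intro l a b
  cases l with
  | nil => rfl
  | cons x xs => simp [pvPreScan]

theorem pv_scan_block : ∀ (rest : List Char) (k : Nat) (c : Char) (v : List Char), 0 < k →
    pvBlockRest c k rest = some v →
    (List.foldl pvPreScan (c, k) rest).2 = (List.foldl pvPreScan (' ', 0) v).2 := by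
  intro rest
  induction rest with
  | nil => intro k c v hk h; simp [pvBlockRest] at h
  | cons x xs ih =>
    intro k c v hk h
    simp only [pvBlockRest] at h
    simp only [List.foldl_cons, pvPreScan, if_neg (by omega : ¬ k = 0)]
    by_cases hx : x = c
    · rw [if_pos hx] at h
      simp only [hx, if_pos rfl]
      exact ih (k + 1) c v (by omega) h
    · rw [if_neg hx] at h
      simp only [if_neg hx]
      by_cases hk1 : k = 1
      · subst hk1
        obtain rfl : xs = v := by simpa using h
        exact pv_scan_zero _ c ' '
      · rw [if_neg hk1] at h
        exact ih (k - 1) c v (by omega) h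

theorem pv_block_none_scan : ∀ (rest : List Char) (k : Nat) (c : Char), 0 < k →
    pvBlockRest c k rest = none → (List.foldl pvPreScan (c, k) rest).2 ≠ 0 := by
  intro rest
  induction rest with
  | nil => intro k c hk _; simpa using by omega
  | cons x xs ih =>
    intro k c hk h
    simp only [pvBlockRest] at h
    simp only [List.foldl_cons, pvPreScan, if_neg (by omega : ¬ k = 0)]
    by_cases hx : x = c
    · rw [if_pos hx] at h
      simp only [hx, if_pos rfl]
      exact ih (k + 1) c (by omega) h
    · rw [if_neg hx] at h
      simp only [if_neg hx]
      by_cases hk1 : k = 1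
      · rw [if_pos hk1] at h; simp at h
      · rw [if_neg hk1] at h
        exact ih (k - 1) c (by omega) h

theorem pv_chunksOk_of_scan : ∀ (n : Nat) (l : List Char), l.length ≤ n →
    (List.foldl pvPreScan (' ', 0) l).2 = 0 → pvChunksOk l = true := by
  intro n
  induction n with
  | zero =>
    intro l hl _
    obtain rfl : l = [] := by cases l <;> simp_all
    simp [pvChunksOk]
  | succ n ih =>
    intro l hl hscan
    cases l with
    | nil => simp [pvChunksOk]
    | cons c rs =>
      have hstep : (List.foldl pvPreScan (' ', 0) (c :: rs)) = List.foldl pvPreScan (c, 1) rs := by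
        simp [pvPreScan]
      rw [hstep] at hscan
      cases hb : pvBlockRest c 1 rs with
      | none => exact absurd hscan (pv_block_none_scan rs 1 c one_pos hb)
      | some v =>
        have hv : (List.foldl pvPreScan (' ', 0) v).2 = 0 := by
          rw [← pv_scan_block rs 1 c v one_pos hb]; exact hscan
        have hvlt := pvBlockRest_length rs c 1 v hb
        have := ih v (by simp at hl; omega) hv
        rw [pvChunksOk, hb]
        exact this

-- ===== VERDICT (by name: the statement is the Claim_ definition above) =====
theorem partSolution_spec : Claim_equal_partSolution := by
  intro w _ hpre
  unfold Spec_partSolution partSolution partSolution_alt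
  exact congrArg String.ofList
    (pv_main w.toList.length w.toList le_rfl
      (pv_chunksOk_of_scan w.toList.length w.toList le_rfl hpre))
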